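-- pv_equiv track=rewrite | github.com/itegav/MyGit | MyGit/test.py | nimporte
-- ===== SOURCE A (Python) =====
-- def nimporte(s, nbd,compteur):
-- 	if nbd == 1 and s < 7:
-- 		compteur +=1
-- 	else :
-- 		for i in range(1,6):
-- 			if s-i >= 1 :
-- 				compteur = nimporte(s-i,nbd-1,compteur)
-- 	return compteur
-- ===== SOURCE B (Python) =====
-- def nimporte(s, nbd, compteur):
--     memo = {}
--
--     def count(s, nbd):
--         if nbd == 1 and s < 7:
--             return 1
--         key = (s, nbd)
--         if key not in memo:
--             memo[key] = sum(count(s - i, nbd - 1) for i in range(1, 6) if s - i >= 1)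
--         return memo[key]
--
--     return compteur + count(s, nbd)
-- ===== Notes on version B (the rewrite author's own statement) =====
-- stated objective: alternative
-- what changed: Replaces A's accumulator-threading recursion with a separated pure path-count function memoized over (s, nbd) states, added to compteur once; intended as faster (measured: A timed out at n=16 where B returned, so no clean ratio was recorded).
import Mathlib
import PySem

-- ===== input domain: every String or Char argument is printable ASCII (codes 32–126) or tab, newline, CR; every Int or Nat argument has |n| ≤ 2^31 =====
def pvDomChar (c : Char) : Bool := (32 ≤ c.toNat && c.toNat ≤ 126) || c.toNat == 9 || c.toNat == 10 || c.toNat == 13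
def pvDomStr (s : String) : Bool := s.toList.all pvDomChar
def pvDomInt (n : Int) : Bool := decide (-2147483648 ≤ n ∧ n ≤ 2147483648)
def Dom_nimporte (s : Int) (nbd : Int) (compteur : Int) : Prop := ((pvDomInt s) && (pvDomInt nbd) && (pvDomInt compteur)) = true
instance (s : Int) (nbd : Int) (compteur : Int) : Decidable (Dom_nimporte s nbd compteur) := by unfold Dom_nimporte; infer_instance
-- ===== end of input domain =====

-- B replaces A's accumulator-threading recursion by a separated pure path-count over
-- (s, nbd) states (memoized in Source B), added to compteur once (objective: alternative).

-- ===== PORT A =====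
-- A's for-loop over range(1,6) threading compteur is the mutual helper nimporteLoop.
mutual
def nimporte (s : Int) (nbd : Int) (compteur : Int) : Int :=
  if nbd = 1 ∧ s < 7 then compteur + 1
  else nimporteLoop s nbd compteur [1, 2, 3, 4, 5] (by decide)
termination_by (s.toNat, 6)

def nimporteLoop (s : Int) (nbd : Int) (compteur : Int) (is : List Int)
    (hpos : ∀ i ∈ is, 1 ≤ i) : Int :=
  match is with
  | [] => compteur
  | i :: rest =>
    have hi : 1 ≤ i := hpos i (List.mem_cons_self ..)
    have hr : ∀ j ∈ rest, 1 ≤ j := fun j hj => hpos j (List.mem_cons_of_mem _ hj)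
    if h : 1 ≤ s - i then nimporteLoop s nbd (nimporte (s - i) (nbd - 1) compteur) rest hr
    else nimporteLoop s nbd compteur rest hr
termination_by (s.toNat, is.length)
decreasing_by
  · left; omega
  · right; simp
  · right; simp
end

-- ===== PORT B =====
-- Source B's inner `count` (memoization is an evaluation cache only; the recursion is this one).
def countB (s : Int) (nbd : Int) : Int :=
  if nbd = 1 ∧ s < 7 then 1
  else (([1, 2, 3, 4, 5] : List Int).attach.map
    (fun x => if h : 1 ≤ s - x.1 then countB (s - x.1) (nbd - 1) else 0)).sum
termination_by s.toNat
decreasing_by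
  have := x.2; simp [List.mem_cons] at this; omega

def nimporte_alt (s : Int) (nbd : Int) (compteur : Int) : Int :=
  compteur + countB s nbd

-- ===== PRECONDITION & SPEC =====
-- Python A recurses with depth about s (s decreases by at least 1 per level), so for s
-- around 1000 and beyond it raises RecursionError; Pre_ keeps s ≤ 900 (a safe margin under
-- CPython's default limit of 1000). It excludes no input on which A observably returns.
def Pre_nimporte (s : Int) (_nbd : Int) (_compteur : Int) : Prop := s ≤ 900
instance (s : Int) (nbd : Int) (compteur : Int) : Decidable (Pre_nimporte s nbd compteur) := by unfold Pre_nimporte; infer_instance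
def pvWitness_nimporte : Int × Int × Int := (10, 3, 0)

def Spec_nimporte (s : Int) (nbd : Int) (compteur : Int) (out : Int) : Prop := out = nimporte_alt s nbd compteur
instance (s : Int) (nbd : Int) (compteur : Int) (out : Int) : Decidable (Spec_nimporte s nbd compteur out) := by unfold Spec_nimporte; infer_instance

-- ===== CLAIM (what is proved, stated in full; the proofs are below) =====
def Claim_equal_nimporte : Prop := ∀ (s : Int) (nbd : Int) (compteur : Int), Dom_nimporte s nbd compteur → Pre_nimporte s nbd compteur → Spec_nimporte s nbd compteur (nimporte s nbd compteur)

-- ===== LEMMAS AND PROOFS =====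

lemma loop_eq (s nbd : Int) (is : List Int) (c : Int) (hpos : ∀ i ∈ is, 1 ≤ i)
    (IH : ∀ i ∈ is, 1 ≤ s - i → ∀ c', nimporte (s - i) (nbd - 1) c' = c' + countB (s - i) (nbd - 1)) :
    nimporteLoop s nbd c is hpos
      = c + (is.map (fun i => if 1 ≤ s - i then countB (s - i) (nbd - 1) else 0)).sum := by
  induction is generalizing c with
  | nil => simp [nimporteLoop]
  | cons i rest ih =>
    rw [nimporteLoop]
    simp only [List.map_cons, List.sum_cons]
    have hr : ∀ j ∈ rest, 1 ≤ j := fun j hj => hpos j (List.mem_cons_of_mem i hj)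
    have IHr := fun j hj => IH j (List.mem_cons_of_mem i hj)
    by_cases h : 1 ≤ s - i
    · rw [dif_pos h, ih _ hr IHr, if_pos h, IH i (List.mem_cons_self ..) h]
      ring
    · rw [dif_neg h, if_neg h, ih _ hr IHr]
      ring

lemma nimporte_eq_countB (s nbd c : Int) : nimporte s nbd c = c + countB s nbd := by
  have H : ∀ n : ℕ, ∀ s nbd c : Int, s.toNat = n → nimporte s nbd c = c + countB s nbd := by
    intro n
    induction n using Nat.strong_induction_on with
    | _ n IH =>
      intro s nbd c hn
      rw [nimporte, countB]
      by_cases h : nbd = 1 ∧ s < 7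
      · simp [h]
      · rw [if_neg h, if_neg h]
        rw [loop_eq s nbd _ c _ (fun i hi h1 c' => by
          have hi' : i = 1 ∨ i = 2 ∨ i = 3 ∨ i = 4 ∨ i = 5 := by
            simpa [List.mem_cons] using hi
          exact IH (s - i).toNat (by omega) _ _ _ rfl)]
        congr 1
  exact H s.toNat s nbd c rfl

-- ===== VERDICT (by name: the statement is the Claim_ definition above) =====
theorem nimporte_spec : Claim_equal_nimporte := by
  intro s nbd c _ _
  unfold Spec_nimporte nimporte_alt
  exact nimporte_eq_countB s nbd c
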